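-- pv_equiv track=rewrite | github.com/max-moser/network-manager-wireguard | auth-dialog/nm-openvpn-auth-dialog.py | check_passwords_required
-- ===== SOURCE A (Python) =====
-- VPN_MESSAGE = "x-vpn-message:"
--
-- VPN_PASS = "password"
--
-- VPN_CERTPASS = "cert-pass"
--
-- VPN_PROXY_PASS = "http-proxy-password"
--
-- def check_passwords_required(hints, name):
--     """Check which passwords we need for the plugin"""
--     prompt = "You need to authenticate to access the VPN '%s'" % name
--     need_password, need_certpass, need_proxy_pass = False, False, False
--     for hint in hints:
--         if hint.startswith(VPN_MESSAGE):
--             prompt = hint[len(VPN_MESSAGE):]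
--         elif hint == VPN_PASS:
--             need_password = True
--         elif hint == VPN_CERTPASS:
--             need_certpass = True
--         elif hint == VPN_PROXY_PASS:
--             need_proxy_pass = True
--
--     # TODO implement other logic from `get_passwords_required()` as well
--
--     return prompt, need_password, need_certpass, need_proxy_pass
-- ===== SOURCE B (Python) =====
-- VPN_MESSAGE = "x-vpn-message:"
-- VPN_PASS = "password"
-- VPN_CERTPASS = "cert-pass"
-- VPN_PROXY_PASS = "http-proxy-password"
--
-- def check_passwords_required(hints, name):
--     """Check which passwords we need for the plugin"""
--     hints = list(hints)
--     msgs = [h[len(VPN_MESSAGE):] for h in hints if h.startswith(VPN_MESSAGE)]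
--     prompt = msgs[-1] if msgs else "You need to authenticate to access the VPN '%s'" % name
--     return (prompt, VPN_PASS in hints, VPN_CERTPASS in hints, VPN_PROXY_PASS in hints)
-- ===== Notes on version B (the rewrite author's own statement) =====
-- stated objective: simpler
-- what changed: Replaces A's single accumulator dispatch loop with independent queries: three membership tests for the flags and a comprehension collecting message suffixes whose last element (or the default) is the prompt.
import Mathlib
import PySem

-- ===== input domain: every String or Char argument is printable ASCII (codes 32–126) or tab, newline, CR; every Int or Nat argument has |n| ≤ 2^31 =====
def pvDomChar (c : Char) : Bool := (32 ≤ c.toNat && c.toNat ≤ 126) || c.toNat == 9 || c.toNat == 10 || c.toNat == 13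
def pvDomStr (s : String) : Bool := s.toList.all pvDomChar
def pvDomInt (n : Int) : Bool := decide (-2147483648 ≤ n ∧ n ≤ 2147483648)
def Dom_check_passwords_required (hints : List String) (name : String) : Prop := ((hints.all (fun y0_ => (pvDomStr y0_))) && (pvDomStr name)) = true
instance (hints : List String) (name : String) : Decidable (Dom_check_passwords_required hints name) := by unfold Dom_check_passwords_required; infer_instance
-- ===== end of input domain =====

-- B replaces A's single dispatch loop by independent queries (membership tests for the
-- three flags, a filtered+mapped message list whose last element gives the prompt); simpler.


-- ===== PORT A =====
def check_passwords_required (hints : List String) (name : String) : String × Bool × Bool × Bool :=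
  let prompt := "You need to authenticate to access the VPN '" ++ name ++ "'"
  hints.foldl
    (fun (s : String × Bool × Bool × Bool) hint =>
      if PySem.Str.startswith hint "x-vpn-message:" then
        (PySem.Str.slice hint (some (PySem.Str.len "x-vpn-message:")) none, s.2.1, s.2.2.1, s.2.2.2)
      else if hint == "password" then (s.1, true, s.2.2.1, s.2.2.2)
      else if hint == "cert-pass" then (s.1, s.2.1, true, s.2.2.2)
      else if hint == "http-proxy-password" then (s.1, s.2.1, s.2.2.1, true)
      else s)
    (prompt, false, false, false)

-- ===== PORT B =====
def check_passwords_required_alt (hints : List String) (name : String) : String × Bool × Bool × Bool :=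
  let msgs := (hints.filter (fun h => PySem.Str.startswith h "x-vpn-message:")).map
      (fun h => PySem.Str.slice h (some (PySem.Str.len "x-vpn-message:")) none)
  let prompt := match msgs.getLast? with
    | some m => m
    | none => "You need to authenticate to access the VPN '" ++ name ++ "'"
  (prompt, hints.contains "password", hints.contains "cert-pass", hints.contains "http-proxy-password")

-- ===== PRECONDITION & SPEC =====
def Spec_check_passwords_required (hints : List String) (name : String) (out : String × Bool × Bool × Bool) : Prop := out = check_passwords_required_alt hints name
instance (hints : List String) (name : String) (out : String × Bool × Bool × Bool) : Decidable (Spec_check_passwords_required hints name out) := by unfold Spec_check_passwords_required; infer_instance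

-- ===== CLAIM (what is proved, stated in full; the proofs are below) =====
def Claim_equal_check_passwords_required : Prop := ∀ (hints : List String) (name : String), Dom_check_passwords_required hints name → Spec_check_passwords_required hints name (check_passwords_required hints name)

-- ===== LEMMAS AND PROOFS =====

-- the suffix taken from a message hint
def pvSuffix (h : String) : String :=
  PySem.Str.slice h (some (PySem.Str.len "x-vpn-message:")) none

def pvMsgs (hints : List String) : List String :=
  (hints.filter (fun h => PySem.Str.startswith h "x-vpn-message:")).map pvSuffix

lemma getLastD_cons {α : Type} (x : α) (l : List α) (d : α) :
    ((x :: l).getLast?.getD d) = l.getLast?.getD x := by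
  cases l with
  | nil => rfl
  | cons y t => simp [List.getLast?_cons]

-- a message hint is none of the three password keywords
lemma startswith_ne (h : String) (hsw : PySem.Str.startswith h "x-vpn-message:" = true) :
    (h == "password") = false ∧ (h == "cert-pass") = false ∧ (h == "http-proxy-password") = false := by
  refine ⟨?_, ?_, ?_⟩
  · by_cases he : h = "password"
    · subst he; exact absurd hsw (by decide)
    · simpa using he
  · by_cases he : h = "cert-pass"
    · subst he; exact absurd hsw (by decide)
    · simpa using he
  · by_cases he : h = "http-proxy-password"
    · subst he; exact absurd hsw (by decide)
    · simpa using he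

lemma loop_eq (l : List String) (p : String) (a b c : Bool) :
    l.foldl
      (fun (s : String × Bool × Bool × Bool) hint =>
        if PySem.Str.startswith hint "x-vpn-message:" then
          (pvSuffix hint, s.2.1, s.2.2.1, s.2.2.2)
        else if hint == "password" then (s.1, true, s.2.2.1, s.2.2.2)
        else if hint == "cert-pass" then (s.1, s.2.1, true, s.2.2.2)
        else if hint == "http-proxy-password" then (s.1, s.2.1, s.2.2.1, true)
        else s)
      (p, a, b, c)
    = ((pvMsgs l).getLast?.getD p,
       a || l.contains "password", b || l.contains "cert-pass", c || l.contains "http-proxy-password") := by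
  induction l generalizing p a b c with
  | nil => simp [pvMsgs]
  | cons h t ih =>
    by_cases hsw : PySem.Str.startswith h "x-vpn-message:" = true
    · obtain ⟨h1, h2, h3⟩ := startswith_ne h hsw
      have hc : ∀ (x : String), (h :: t).contains x = ((h == x) || t.contains x) := by
        intro x
        by_cases hx : x = h
        · subst hx; simp
        · simp [List.contains_cons, hx, Ne.symm hx]
      simp only [List.foldl_cons, hsw, if_true, ih]
      have hm : pvMsgs (h :: t) = pvSuffix h :: pvMsgs t := by
        simp only [pvMsgs, List.filter_cons, hsw, if_true, List.map_cons]
      rw [hm, getLastD_cons, hc, hc, hc, h1, h2, h3]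
      simp
    · have hsw' : PySem.Str.startswith h "x-vpn-message:" = false := by
        simpa using hsw
      have hm : pvMsgs (h :: t) = pvMsgs t := by
        simp only [pvMsgs, List.filter_cons, hsw', Bool.false_eq_true, if_false]
      have hc : ∀ (x : String), (h :: t).contains x = ((h == x) || t.contains x) := by
        intro x
        by_cases hx : x = h
        · subst hx; simp
        · simp [List.contains_cons, hx, Ne.symm hx]
      simp only [List.foldl_cons, hsw', Bool.false_eq_true, if_false, hm, hc]
      by_cases e1 : (h == "password") = true
      · have : h = "password" := by simpa using e1
        subst this
        simp only [if_true, ih]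
        simp
      · simp only [e1, if_false]
        by_cases e2 : (h == "cert-pass") = true
        · have : h = "cert-pass" := by simpa using e2
          subst this
          simp only [if_true, ih]
          simp at e1
          simp [e1]
        · simp only [e2, if_false]
          by_cases e3 : (h == "http-proxy-password") = true
          · have : h = "http-proxy-password" := by simpa using e3
            subst this
            simp only [if_true, ih]
            simp at e1 e2
            simp [e1, e2]
          · simp only [e3, if_false, ih]
            simp at e1 e2 e3
            simp [e1, e2, e3]

lemma alt_getD (hints : List String) (name : String) :
    check_passwords_required_alt hints name =
      ((pvMsgs hints).getLast?.getD ("You need to authenticate to access the VPN '" ++ name ++ "'"),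
       hints.contains "password", hints.contains "cert-pass", hints.contains "http-proxy-password") := by
  unfold check_passwords_required_alt
  have : ((hints.filter (fun h => PySem.Str.startswith h "x-vpn-message:")).map
      (fun h => PySem.Str.slice h (some (PySem.Str.len "x-vpn-message:")) none)) = pvMsgs hints := rfl
  rw [this]
  cases hg : (pvMsgs hints).getLast? <;> simp [hg]

-- ===== VERDICT (by name: the statement is the Claim_ definition above) =====
theorem check_passwords_required_spec : Claim_equal_check_passwords_required := by
  intro hints name _
  unfold Spec_check_passwords_required check_passwords_required
  rw [alt_getD]
  exact loop_eq hints _ false false false
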